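-- pv_equiv track=rewrite | github.com/jillesca/gNMIBuddy | src/parsers/interfaces/data_formatter.py | calculate_interface_statistics
-- ===== SOURCE A (Python) =====
-- from typing import Dict, Any, List, Optional
--
-- def calculate_interface_statistics(
--     interfaces: List[Dict[str, Any]],
-- ) -> Dict[str, int]:
--     """
--     Calculate summary statistics for interface information.
--
--     Args:
--         interfaces: List of interface dictionaries
--
--     Returns:
--         Dictionary of summary statistics
--     """
--     total_interfaces = len(interfaces)
--
--     # Count interfaces with various statuses
--     admin_up = sum(
--         1 for intf in interfaces if intf.get("admin_status") == "UP"
--     )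
--     oper_up = sum(1 for intf in interfaces if intf.get("oper_status") == "UP")
--     with_ip = sum(1 for intf in interfaces if "ip_address" in intf)
--     with_vrf = sum(1 for intf in interfaces if "vrf" in intf)
--
--     return {
--         "total_interfaces": total_interfaces,
--         "admin_up": admin_up,
--         "admin_down": total_interfaces - admin_up,
--         "oper_up": oper_up,
--         "oper_down": total_interfaces - oper_up,
--         "with_ip": with_ip,
--         "with_vrf": with_vrf,
--     }
-- ===== SOURCE B (Python) =====
-- def calculate_interface_statistics(interfaces):
--     """Divide-and-conquer: recursively tally a 4-vector of counts over halves and merge."""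
--
--     def tally(seg):
--         n = len(seg)
--         if n == 0:
--             return (0, 0, 0, 0)
--         if n == 1:
--             intf = seg[0]
--             return (
--                 1 if intf.get("admin_status") == "UP" else 0,
--                 1 if intf.get("oper_status") == "UP" else 0,
--                 1 if "ip_address" in intf else 0,
--                 1 if "vrf" in intf else 0,
--             )
--         mid = n // 2
--         left = tally(seg[:mid])
--         right = tally(seg[mid:])
--         return (left[0] + right[0], left[1] + right[1],
--                 left[2] + right[2], left[3] + right[3])
--
--     admin_up, oper_up, with_ip, with_vrf = tally(interfaces)
--     total = len(interfaces)
--     return {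
--         "total_interfaces": total,
--         "admin_up": admin_up,
--         "admin_down": total - admin_up,
--         "oper_up": oper_up,
--         "oper_down": total - oper_up,
--         "with_ip": with_ip,
--         "with_vrf": with_vrf,
--     }
-- ===== Notes on version B (the rewrite author's own statement) =====
-- stated objective: alternative
-- what changed: Replaces A's four separate linear sum-scans with a divide-and-conquer recursion that computes a per-interface 4-vector of indicator counts and merges halves by element-wise addition.
import Mathlib
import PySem

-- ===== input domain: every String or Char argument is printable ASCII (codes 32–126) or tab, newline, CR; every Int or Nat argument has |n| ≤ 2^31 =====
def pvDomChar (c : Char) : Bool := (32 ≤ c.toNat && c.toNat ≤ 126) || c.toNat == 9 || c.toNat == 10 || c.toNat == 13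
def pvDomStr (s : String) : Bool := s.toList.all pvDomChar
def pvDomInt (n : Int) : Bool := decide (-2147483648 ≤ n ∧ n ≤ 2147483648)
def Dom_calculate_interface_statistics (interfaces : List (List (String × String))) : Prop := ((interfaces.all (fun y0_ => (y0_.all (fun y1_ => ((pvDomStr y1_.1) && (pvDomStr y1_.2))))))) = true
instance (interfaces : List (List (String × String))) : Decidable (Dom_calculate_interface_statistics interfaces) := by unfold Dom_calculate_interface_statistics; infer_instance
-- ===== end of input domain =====

-- B replaces A's four separate linear sum-scans by a divide-and-conquer recursion
-- merging per-half 4-vectors of counts (objective: alternative, same output).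

-- ===== PORT A =====
-- intf.get(k) / 'k in intf': first-match lookup in the association list (dict convention)
def pvGetKey (intf : List (String × String)) (k : String) : Option String :=
  intf.lookup k

-- each 'sum(1 for intf in interfaces if cond)' is its own fold over the list
def calculate_interface_statistics (interfaces : List (List (String × String))) : List (String × Int) :=
  let total_interfaces : Int := interfaces.length
  let admin_up : Int := interfaces.foldl (fun acc intf => if pvGetKey intf "admin_status" = some "UP" then acc + 1 else acc) 0
  let oper_up : Int := interfaces.foldl (fun acc intf => if pvGetKey intf "oper_status" = some "UP" then acc + 1 else acc) 0
  let with_ip : Int := interfaces.foldl (fun acc intf => if (pvGetKey intf "ip_address").isSome then acc + 1 else acc) 0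
  let with_vrf : Int := interfaces.foldl (fun acc intf => if (pvGetKey intf "vrf").isSome then acc + 1 else acc) 0
  [("total_interfaces", total_interfaces),
   ("admin_up", admin_up),
   ("admin_down", total_interfaces - admin_up),
   ("oper_up", oper_up),
   ("oper_down", total_interfaces - oper_up),
   ("with_ip", with_ip),
   ("with_vrf", with_vrf)]

-- ===== PORT B =====
-- tally(seg): the 4-vector of counts for a segment; an empty or one-element segment is
-- tallied directly, a longer one is split at the middle, both halves tallied recursively
-- and the results merged by element-wise addition
def pvTally : List (List (String × String)) → Int × Int × Int × Int
  | [] => (0, 0, 0, 0)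
  | [intf] =>
      ((if pvGetKey intf "admin_status" = some "UP" then 1 else 0),
       (if pvGetKey intf "oper_status" = some "UP" then 1 else 0),
       (if (pvGetKey intf "ip_address").isSome then 1 else 0),
       (if (pvGetKey intf "vrf").isSome then 1 else 0))
  | x :: y :: rest =>
      let seg := x :: y :: rest
      let mid := seg.length / 2
      let l := pvTally (seg.take mid)
      let r := pvTally (seg.drop mid)
      (l.1 + r.1, l.2.1 + r.2.1, l.2.2.1 + r.2.2.1, l.2.2.2 + r.2.2.2)
termination_by seg => seg.length
decreasing_by
  · simp only [List.length_take, List.length_cons]; omega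
  · simp only [List.length_drop, List.length_cons]; omega

def calculate_interface_statistics_alt (interfaces : List (List (String × String))) : List (String × Int) :=
  let c := pvTally interfaces
  let total : Int := interfaces.length
  [("total_interfaces", total),
   ("admin_up", c.1),
   ("admin_down", total - c.1),
   ("oper_up", c.2.1),
   ("oper_down", total - c.2.1),
   ("with_ip", c.2.2.1),
   ("with_vrf", c.2.2.2)]

-- ===== PRECONDITION & SPEC =====
def Spec_calculate_interface_statistics (interfaces : List (List (String × String))) (out : List (String × Int)) : Prop := out = calculate_interface_statistics_alt interfaces
instance (interfaces : List (List (String × String))) (out : List (String × Int)) : Decidable (Spec_calculate_interface_statistics interfaces out) := by unfold Spec_calculate_interface_statistics; infer_instance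

-- ===== CLAIM (what is proved, stated in full; the proofs are below) =====
def Claim_equal_calculate_interface_statistics : Prop := ∀ (interfaces : List (List (String × String))), Dom_calculate_interface_statistics interfaces → Spec_calculate_interface_statistics interfaces (calculate_interface_statistics interfaces)

-- ===== LEMMAS AND PROOFS =====
-- A's counting fold shifted by its initial accumulator
theorem pvShift (p : List (String × String) → Prop) [DecidablePred p]
    (l : List (List (String × String))) : ∀ a : Int,
    l.foldl (fun acc intf => if p intf then acc + 1 else acc) a
      = a + l.foldl (fun acc intf => if p intf then acc + 1 else acc) 0 := by
  induction l with
  | nil => intro a; simp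
  | cons x xs ih =>
    intro a
    simp only [List.foldl_cons]
    by_cases h : p x
    · simp only [if_pos h]; rw [ih (a + 1), ih (0 + 1)]; ring
    · simp only [if_neg h]; exact ih a
-- A's counting fold is additive over append
theorem pvSplit (p : List (String × String) → Prop) [DecidablePred p]
    (l₁ l₂ : List (List (String × String))) :
    (l₁ ++ l₂).foldl (fun acc intf => if p intf then acc + 1 else acc) (0 : Int)
      = l₁.foldl (fun acc intf => if p intf then acc + 1 else acc) (0 : Int)
        + l₂.foldl (fun acc intf => if p intf then acc + 1 else acc) (0 : Int) := by
  rw [List.foldl_append]; exact pvShift p l₂ _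

-- B's divide-and-conquer tally computes exactly A's four fold counts
theorem pvTallyCount (seg : List (List (String × String))) :
    pvTally seg =
      (seg.foldl (fun acc intf => if pvGetKey intf "admin_status" = some "UP" then acc + 1 else acc) 0,
       seg.foldl (fun acc intf => if pvGetKey intf "oper_status" = some "UP" then acc + 1 else acc) 0,
       seg.foldl (fun acc intf => if (pvGetKey intf "ip_address").isSome then acc + 1 else acc) 0,
       seg.foldl (fun acc intf => if (pvGetKey intf "vrf").isSome then acc + 1 else acc) 0) := by
  induction seg using pvTally.induct with
  | case1 => simp [pvTally]
  | case2 intf => simp [pvTally]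
  | case3 x y rest seg mid ihl ihr =>
    rw [pvTally]
    rw [ihl, ihr]
    have h := List.take_append_drop ((x :: y :: rest).length / 2) (x :: y :: rest)
    conv_rhs => rw [← h]
    rw [pvSplit, pvSplit, pvSplit, pvSplit]

-- ===== VERDICT (by name: the statement is the Claim_ definition above) =====
theorem calculate_interface_statistics_spec : Claim_equal_calculate_interface_statistics := by
  intro interfaces _
  unfold Spec_calculate_interface_statistics calculate_interface_statistics calculate_interface_statistics_alt
  rw [pvTallyCount]
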